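-- pv_equiv track=rewrite | github.com/jasdeep06/RelationshipExtractionUniversal | evaluation_matrics.py | find_pos_and_neg
-- ===== SOURCE A (Python) =====
-- def find_pos_and_neg(labels,predictions):
--     num_classes=len(set(labels))
--     batch_size=len(predictions)
--     tp = {}
--     tn = {}
--     fp = {}
--     fn = {}
--     for i in range(1,num_classes+1):
--         for j in range(0,batch_size):
--             if predictions[j]==i:
--                 if labels[j]==i:
--                     if i in tp.keys():
--                         tp[i] = tp[i] + 1
--                     else:
--                         tp[i] = 1
--                 else:
--                     if i in fp.keys():
--                         fp[i] = fp[i] + 1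
--                     else:
--                         fp[i] = 1
--             else:
--                 if labels[j]==i:
--                     if i in fn.keys():
--                         fn[i] = fn[i] + 1
--                     else:
--                         fn[i] = 1
--                 else:
--                     if i in tn.keys():
--                         tn[i] = tn[i] + 1
--                     else:
--                         tn[i] = 1
--     return tp,tn,fp,fn
-- ===== SOURCE B (Python) =====
-- def _tally(xs):
--     d = {}
--     for x in xs:
--         d[x] = d.get(x, 0) + 1
--     return d
--
--
-- def find_pos_and_neg(labels, predictions):
--     num_classes = len(set(labels))
--     n = len(predictions)
--     pair_labels = labels[:n]
--     lab_cnt = _tally(pair_labels)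
--     pred_cnt = _tally(predictions)
--     both_cnt = _tally([l for l, p in zip(pair_labels, predictions) if l == p])
--     tp, tn, fp, fn = {}, {}, {}, {}
--     for i in range(1, num_classes + 1):
--         t = both_cnt.get(i, 0)
--         f_p = pred_cnt.get(i, 0) - t
--         f_n = lab_cnt.get(i, 0) - t
--         t_n = n - t - f_p - f_n
--         if t:
--             tp[i] = t
--         if t_n:
--             tn[i] = t_n
--         if f_p:
--             fp[i] = f_p
--         if f_n:
--             fn[i] = f_n
--     return tp, tn, fp, fn
-- ===== Notes on version B (the rewrite author's own statement) =====
-- stated objective: faster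
-- what changed: Replaces A's O(C*N) loop that rescans all predictions once per class with a single O(N) tally pass (per-value counts of labels, predictions and correct pairs) followed by an O(C) walk that derives fp and fn by subtraction and tn arithmetically as batch - tp - fp - fn.
import Mathlib
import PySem

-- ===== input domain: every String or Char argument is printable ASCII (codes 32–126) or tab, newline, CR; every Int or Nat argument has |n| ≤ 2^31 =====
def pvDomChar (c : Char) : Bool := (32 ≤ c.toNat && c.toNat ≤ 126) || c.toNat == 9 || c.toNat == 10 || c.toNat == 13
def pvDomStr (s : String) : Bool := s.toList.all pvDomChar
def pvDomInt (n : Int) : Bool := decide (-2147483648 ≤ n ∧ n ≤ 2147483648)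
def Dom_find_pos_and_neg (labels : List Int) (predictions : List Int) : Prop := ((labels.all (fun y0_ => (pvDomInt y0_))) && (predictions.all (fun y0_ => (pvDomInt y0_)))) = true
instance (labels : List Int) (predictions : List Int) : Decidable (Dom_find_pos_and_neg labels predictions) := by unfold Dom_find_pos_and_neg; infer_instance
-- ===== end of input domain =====

-- B replaces A's O(C·N) class-by-class rescan with one O(N) tally pass plus an O(C) table walk
-- deriving tn arithmetically (objective: faster).

-- ===== PORT A =====
def find_pos_and_neg (labels : List Int) (predictions : List Int) :
    (List (Int × Int)) × (List (Int × Int)) × (List (Int × Int)) × (List (Int × Int)) :=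
  let num_classes : Int := ((PySem.Set.ofList labels).length : Int)
  let batch_size : Int := (predictions.length : Int)
  let r :=
    (PySem.List.pyRange 1 (num_classes + 1) 1).foldl (fun s i =>
      (PySem.List.pyRange 0 batch_size 1).foldl (fun s j =>
        -- Pre_ ensures j is in range for both lists, so pyGetD is exact here (Python indexing)
        if PySem.List.pyGetD predictions j 0 == i then
          if PySem.List.pyGetD labels j 0 == i then
            (if s.1.contains i then s.1.insert i (s.1.getD i 0 + 1) else s.1.insert i 1,
             s.2.1, s.2.2.1, s.2.2.2)
          else
            (s.1, s.2.1,
             if s.2.2.1.contains i then s.2.2.1.insert i (s.2.2.1.getD i 0 + 1) else s.2.2.1.insert i 1,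
             s.2.2.2)
        else
          if PySem.List.pyGetD labels j 0 == i then
            (s.1, s.2.1, s.2.2.1,
             if s.2.2.2.contains i then s.2.2.2.insert i (s.2.2.2.getD i 0 + 1) else s.2.2.2.insert i 1)
          else
            (s.1,
             if s.2.1.contains i then s.2.1.insert i (s.2.1.getD i 0 + 1) else s.2.1.insert i 1,
             s.2.2.1, s.2.2.2)) s)
      ((PySem.Dict.empty, PySem.Dict.empty, PySem.Dict.empty, PySem.Dict.empty) :
        PySem.Dict Int Int × PySem.Dict Int Int × PySem.Dict Int Int × PySem.Dict Int Int)
  (r.1.items, r.2.1.items, r.2.2.1.items, r.2.2.2.items)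

-- ===== PORT B =====
-- helper _tally of Source B: d = {}; for x in xs: d[x] = d.get(x, 0) + 1
def pvTally (xs : List Int) : PySem.Dict Int Int :=
  xs.foldl (fun d x => d.insert x (d.getD x 0 + 1)) PySem.Dict.empty

def find_pos_and_neg_alt (labels : List Int) (predictions : List Int) :
    (List (Int × Int)) × (List (Int × Int)) × (List (Int × Int)) × (List (Int × Int)) :=
  let num_classes : Int := ((PySem.Set.ofList labels).length : Int)
  let n : Int := (predictions.length : Int)
  let pair_labels := PySem.List.slice labels none (some n)
  let lab_cnt := pvTally pair_labels
  let pred_cnt := pvTally predictions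
  let both_cnt := pvTally (((pair_labels.zip predictions).filter (fun q => q.1 == q.2)).map (fun q => q.1))
  let r :=
    (PySem.List.pyRange 1 (num_classes + 1) 1).foldl (fun s i =>
      let t := both_cnt.getD i 0
      let f_p := pred_cnt.getD i 0 - t
      let f_n := lab_cnt.getD i 0 - t
      let t_n := n - t - f_p - f_n
      (if t ≠ 0 then s.1.insert i t else s.1,
       if t_n ≠ 0 then s.2.1.insert i t_n else s.2.1,
       if f_p ≠ 0 then s.2.2.1.insert i f_p else s.2.2.1,
       if f_n ≠ 0 then s.2.2.2.insert i f_n else s.2.2.2))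
      ((PySem.Dict.empty, PySem.Dict.empty, PySem.Dict.empty, PySem.Dict.empty) :
        PySem.Dict Int Int × PySem.Dict Int Int × PySem.Dict Int Int × PySem.Dict Int Int)
  (r.1.items, r.2.1.items, r.2.2.1.items, r.2.2.2.items)

-- ===== PRECONDITION & SPEC =====
-- Pre_ excludes exactly the inputs where Python A raises IndexError: a nonempty labels list
-- shorter than predictions (the inner loop indexes labels[j] for every j < len(predictions)).
def Pre_find_pos_and_neg (labels : List Int) (predictions : List Int) : Prop :=
  predictions.length ≤ labels.length ∨ labels = []
instance (labels : List Int) (predictions : List Int) : Decidable (Pre_find_pos_and_neg labels predictions) := by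
  unfold Pre_find_pos_and_neg; infer_instance
def pvWitness_find_pos_and_neg : List Int × List Int := ([1, 2, 1], [1, 2, 2])

def Spec_find_pos_and_neg (labels : List Int) (predictions : List Int)
    (out : (List (Int × Int)) × (List (Int × Int)) × (List (Int × Int)) × (List (Int × Int))) : Prop :=
  out = find_pos_and_neg_alt labels predictions
instance (labels : List Int) (predictions : List Int)
    (out : (List (Int × Int)) × (List (Int × Int)) × (List (Int × Int)) × (List (Int × Int))) :
    Decidable (Spec_find_pos_and_neg labels predictions out) := by
  unfold Spec_find_pos_and_neg; infer_instance

-- ===== CLAIM (what is proved, stated in full; the proofs are below) =====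
def Claim_equal_find_pos_and_neg : Prop := ∀ (labels : List Int) (predictions : List Int), Dom_find_pos_and_neg labels predictions → Pre_find_pos_and_neg labels predictions → Spec_find_pos_and_neg labels predictions (find_pos_and_neg labels predictions)

-- ===== LEMMAS AND PROOFS =====

-- the four per-class outcome predicates on a (label, prediction) pair, in A's branch order
def pvTP (i : Int) (q : Int × Int) : Bool := q.2 == i && q.1 == i
def pvFP (i : Int) (q : Int × Int) : Bool := q.2 == i && !(q.1 == i)
def pvFN (i : Int) (q : Int × Int) : Bool := !(q.2 == i) && q.1 == i
def pvTN (i : Int) (q : Int × Int) : Bool := !(q.2 == i) && !(q.1 == i)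

-- state abbreviation
def pvSt : Type := PySem.Dict Int Int × PySem.Dict Int Int × PySem.Dict Int Int × PySem.Dict Int Int

def pvEmpty4 : pvSt := (PySem.Dict.empty, PySem.Dict.empty, PySem.Dict.empty, PySem.Dict.empty)

-- A's inner-loop body, on a (label, prediction) pair
def pvStep (i : Int) (s : pvSt) (q : Int × Int) : pvSt :=
  if q.2 == i then
    if q.1 == i then
      (if s.1.contains i then s.1.insert i (s.1.getD i 0 + 1) else s.1.insert i 1,
       s.2.1, s.2.2.1, s.2.2.2)
    else
      (s.1, s.2.1,
       if s.2.2.1.contains i then s.2.2.1.insert i (s.2.2.1.getD i 0 + 1) else s.2.2.1.insert i 1,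
       s.2.2.2)
  else
    if q.1 == i then
      (s.1, s.2.1, s.2.2.1,
       if s.2.2.2.contains i then s.2.2.2.insert i (s.2.2.2.getD i 0 + 1) else s.2.2.2.insert i 1)
    else
      (s.1,
       if s.2.1.contains i then s.2.1.insert i (s.2.1.getD i 0 + 1) else s.2.1.insert i 1,
       s.2.2.1, s.2.2.2)

-- "increment key i, m times"
def pvBump (d : PySem.Dict Int Int) (i : Int) (m : Nat) : PySem.Dict Int Int :=
  if m = 0 then d else d.insert i (d.getD i 0 + (m : Int))

-- the canonical per-class step both outer loops reduce to
def pvStepC (m1 m2 m3 m4 : Int → Nat) (s : pvSt) (i : Int) : pvSt :=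
  (if m1 i ≠ 0 then s.1.insert i (m1 i : Int) else s.1,
   if m2 i ≠ 0 then s.2.1.insert i (m2 i : Int) else s.2.1,
   if m3 i ≠ 0 then s.2.2.1.insert i (m3 i : Int) else s.2.2.1,
   if m4 i ≠ 0 then s.2.2.2.insert i (m4 i : Int) else s.2.2.2)

def pvOut (s : pvSt) :
    (List (Int × Int)) × (List (Int × Int)) × (List (Int × Int)) × (List (Int × Int)) :=
  (s.1.items, s.2.1.items, s.2.2.1.items, s.2.2.2.items)

def pvCanon (labels predictions : List Int) :
    (List (Int × Int)) × (List (Int × Int)) × (List (Int × Int)) × (List (Int × Int)) :=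
  let P := labels.zip predictions
  pvOut ((PySem.List.pyRange 1 (((PySem.Set.ofList labels).length : Int) + 1) 1).foldl
    (pvStepC (fun i => P.countP (pvTP i)) (fun i => P.countP (pvTN i))
             (fun i => P.countP (pvFP i)) (fun i => P.countP (pvFN i))) pvEmpty4)

lemma pvCountP_split {α : Type} (l : List α) (p q : α → Bool) :
    l.countP p = l.countP (fun a => p a && q a) + l.countP (fun a => p a && !q a) := by
  induction l with
  | nil => simp
  | cons a l ih =>
    simp only [List.countP_cons, ih]
    cases hp : p a <;> cases hq : q a <;> simp <;> omega

lemma pvZipTake (xs ys : List Int) (h : ys.length ≤ xs.length) :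
    (xs.take ys.length).zip ys = xs.zip ys := by
  rw [List.zip_eq_zip_take_min (l₁ := xs.take ys.length), List.zip_eq_zip_take_min (l₁ := xs) (l₂ := ys)]
  simp [Nat.min_eq_right h, List.take_take, Nat.min_eq_left h]

lemma pvBumpIf (d : PySem.Dict Int Int) (i : Int) :
    (if d.contains i then d.insert i (d.getD i 0 + 1) else d.insert i 1) = d.insert i (d.getD i 0 + 1) := by
  by_cases h : d.contains i = true
  · simp [h]
  · simp only [Bool.not_eq_true] at h
    simp [h, PySem.Dict.getD_of_not_contains d 0 h]

lemma pvBumpAbsorb (d : PySem.Dict Int Int) (i : Int) (m : Nat) :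
    pvBump (d.insert i (d.getD i 0 + 1)) i m = pvBump d i (m + 1) := by
  unfold pvBump
  cases m with
  | zero => simp
  | succ m =>
    rw [if_neg (Nat.succ_ne_zero m), if_neg (Nat.succ_ne_zero (m + 1)),
      PySem.Dict.getD_insert_self, PySem.Dict.insert_insert_self]
    congr 1
    push_cast
    ring

lemma pvBumpFresh (d : PySem.Dict Int Int) (i : Int) (m : Nat) (h : d.contains i = false) :
    pvBump d i m = if m ≠ 0 then d.insert i (m : Int) else d := by
  unfold pvBump
  by_cases hm : m = 0
  · simp [hm]
  · simp [hm, PySem.Dict.getD_of_not_contains d 0 h]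

lemma pvInnerA (i : Int) (ps : List (Int × Int)) : ∀ (s : pvSt),
    ps.foldl (pvStep i) s =
      (pvBump s.1 i (ps.countP (pvTP i)), pvBump s.2.1 i (ps.countP (pvTN i)),
       pvBump s.2.2.1 i (ps.countP (pvFP i)), pvBump s.2.2.2 i (ps.countP (pvFN i))) := by
  induction ps with
  | nil => intro s; simp [pvBump]
  | cons q ps ih =>
    intro s
    rw [List.foldl_cons, ih]
    by_cases hp : q.2 == i <;> by_cases hl : q.1 == i <;>
      simp only [pvStep, hp, hl, Bool.not_true, Bool.not_false,
        pvTP, pvFP, pvFN, pvTN, List.countP_cons, pvBumpIf] <;>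
      simp [pvBumpAbsorb]

lemma pvFoldBumpC (m1 m2 m3 m4 : Int → Nat) : ∀ (is : List Int), is.Nodup → ∀ (s : pvSt),
    (∀ i ∈ is, s.1.contains i = false) → (∀ i ∈ is, s.2.1.contains i = false) →
    (∀ i ∈ is, s.2.2.1.contains i = false) → (∀ i ∈ is, s.2.2.2.contains i = false) →
    is.foldl (fun s i => (pvBump s.1 i (m1 i), pvBump s.2.1 i (m2 i),
                          pvBump s.2.2.1 i (m3 i), pvBump s.2.2.2 i (m4 i))) s =
    is.foldl (pvStepC m1 m2 m3 m4) s := by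
  intro is
  induction is with
  | nil => intros; rfl
  | cons i is ih =>
    intro hnd s h1 h2 h3 h4
    have hi : i ∉ is := (List.nodup_cons.mp hnd).1
    have hnd' : is.Nodup := (List.nodup_cons.mp hnd).2
    rw [List.foldl_cons, List.foldl_cons]
    have e1 := pvBumpFresh s.1 i (m1 i) (h1 i List.mem_cons_self)
    have e2 := pvBumpFresh s.2.1 i (m2 i) (h2 i List.mem_cons_self)
    have e3 := pvBumpFresh s.2.2.1 i (m3 i) (h3 i List.mem_cons_self)
    have e4 := pvBumpFresh s.2.2.2 i (m4 i) (h4 i List.mem_cons_self)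
    have hstep : (pvBump s.1 i (m1 i), pvBump s.2.1 i (m2 i), pvBump s.2.2.1 i (m3 i),
        pvBump s.2.2.2 i (m4 i)) = pvStepC m1 m2 m3 m4 s i := by
      rw [e1, e2, e3, e4]; rfl
    rw [hstep]
    apply ih hnd'
    all_goals
      intro j hj
      have hne : j ≠ i := fun hji => hi (hji ▸ hj)
      simp only [pvStepC]
    · split_ifs with hm
      · simp [PySem.Dict.contains_insert, hne, h1 j (List.mem_cons_of_mem _ hj)]
      · exact h1 j (List.mem_cons_of_mem _ hj)
    · split_ifs with hm
      · simp [PySem.Dict.contains_insert, hne, h2 j (List.mem_cons_of_mem _ hj)]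
      · exact h2 j (List.mem_cons_of_mem _ hj)
    · split_ifs with hm
      · simp [PySem.Dict.contains_insert, hne, h3 j (List.mem_cons_of_mem _ hj)]
      · exact h3 j (List.mem_cons_of_mem _ hj)
    · split_ifs with hm
      · simp [PySem.Dict.contains_insert, hne, h4 j (List.mem_cons_of_mem _ hj)]
      · exact h4 j (List.mem_cons_of_mem _ hj)

lemma pvA_eq (labels predictions : List Int) (h : predictions.length ≤ labels.length) :
    find_pos_and_neg labels predictions = pvCanon labels predictions := by
  have hPlen : (labels.zip predictions).length = predictions.length := by
    simp [List.length_zip]; omega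
  have hinner : ∀ (s : pvSt) (i : Int),
      (PySem.List.pyRange 0 ((predictions.length : Int)) 1).foldl (fun s j =>
        if PySem.List.pyGetD predictions j 0 == i then
          if PySem.List.pyGetD labels j 0 == i then
            (if s.1.contains i then s.1.insert i (s.1.getD i 0 + 1) else s.1.insert i 1,
             s.2.1, s.2.2.1, s.2.2.2)
          else
            (s.1, s.2.1,
             if s.2.2.1.contains i then s.2.2.1.insert i (s.2.2.1.getD i 0 + 1) else s.2.2.1.insert i 1,
             s.2.2.2)
        else
          if PySem.List.pyGetD labels j 0 == i then
            (s.1, s.2.1, s.2.2.1,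
             if s.2.2.2.contains i then s.2.2.2.insert i (s.2.2.2.getD i 0 + 1) else s.2.2.2.insert i 1)
          else
            (s.1,
             if s.2.1.contains i then s.2.1.insert i (s.2.1.getD i 0 + 1) else s.2.1.insert i 1,
             s.2.2.1, s.2.2.2)) s
      = (labels.zip predictions).foldl (pvStep i) s := by
    intro s i
    have hb : ((predictions.length : Int)) = (((labels.zip predictions).length : Int)) := by
      rw [hPlen]
    rw [hb]
    refine (PySem.List.foldl_congr_mem _ _
      (fun acc j => pvStep i acc (PySem.List.pyGetD (labels.zip predictions) j ((0 : Int), (0 : Int)))) s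
      ?_).trans ((PySem.List.foldl_pyRange_pyGetD' (labels.zip predictions) ((0 : Int), (0 : Int))
        (pvStep i) s (le_refl 0)).trans (by rw [Int.toNat_zero, List.drop_zero]))
    · intro acc j hj
      rcases PySem.List.mem_pyRange_one.mp hj with ⟨hj0, hjlt⟩
      have hk : j.toNat < (labels.zip predictions).length := by omega
      have hkp : j.toNat < predictions.length := by omega
      have hkl : j.toNat < labels.length := by omega
      simp only [PySem.List.pyGetD_of_nonneg _ _ hj0, List.getD_eq_getElem _ _ hk,
        List.getD_eq_getElem _ _ hkp, List.getD_eq_getElem _ _ hkl, pvStep, List.getElem_zip]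
      rfl
  show pvOut _ = pvCanon labels predictions
  unfold pvCanon
  apply congrArg pvOut
  calc (PySem.List.pyRange 1 (((PySem.Set.ofList labels).length : Int) + 1) 1).foldl _ pvEmpty4
      = (PySem.List.pyRange 1 (((PySem.Set.ofList labels).length : Int) + 1) 1).foldl
          (fun s i => ((labels.zip predictions).foldl (pvStep i) s)) pvEmpty4 := by
        exact PySem.List.foldl_congr_mem _ _ _ _ (fun acc i _ => hinner acc i)
    _ = (PySem.List.pyRange 1 (((PySem.Set.ofList labels).length : Int) + 1) 1).foldl
          (fun s i => (pvBump s.1 i ((labels.zip predictions).countP (pvTP i)),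
                       pvBump s.2.1 i ((labels.zip predictions).countP (pvTN i)),
                       pvBump s.2.2.1 i ((labels.zip predictions).countP (pvFP i)),
                       pvBump s.2.2.2 i ((labels.zip predictions).countP (pvFN i)))) pvEmpty4 := by
        exact PySem.List.foldl_congr_mem _ _ _ _ (fun acc i _ => pvInnerA i _ acc)
    _ = _ := by
        apply pvFoldBumpC _ _ _ _ _ (PySem.List.nodup_pyRange_one _ _) <;>
          (intro j hj; simp [pvEmpty4, PySem.Dict.contains_empty])

lemma pvB_eq (labels predictions : List Int) (h : predictions.length ≤ labels.length) :
    find_pos_and_neg_alt labels predictions = pvCanon labels predictions := by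
  have hPlen : (labels.zip predictions).length = predictions.length := by
    simp [List.length_zip]; omega
  have hpair : PySem.List.slice labels none (some ((predictions.length : Int)))
      = labels.take predictions.length := by
    rw [PySem.List.slice_to labels (by positivity)]
    simp
  have hzip : (labels.take predictions.length).zip predictions = labels.zip predictions :=
    pvZipTake _ _ h
  have hmap1 : (labels.zip predictions).map Prod.fst = labels.take predictions.length := by
    rw [← hzip]
    exact List.map_fst_zip (by simp)
  have hmap2 : (labels.zip predictions).map Prod.snd = predictions :=
    List.map_snd_zip h
  have hcount : ∀ (xs : List Int) (i : Int), List.count i xs = xs.countP (fun a => a == i) := by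
    intro xs i; rfl
  have htp' : ∀ i : Int, ((labels.zip predictions).filter (fun q => q.1 == q.2)).countP
      (fun q => q.1 == i) = (labels.zip predictions).countP (pvTP i) := by
    intro i
    rw [List.countP_filter]
    apply List.countP_congr
    intro q _
    by_cases h1 : q.1 = i <;> by_cases h2 : q.2 = i <;>
      simp [pvTP, h1, h2] <;> omega
  have hboth : ∀ i : Int,
      (pvTally ((((labels.zip predictions).filter (fun q => q.1 == q.2)).map (fun q => q.1)))).getD i 0
      = ((labels.zip predictions).countP (pvTP i) : Int) := by
    intro i
    unfold pvTally
    rw [PySem.Dict.foldl_insert_getD_add_one_eq_counter, PySem.Dict.getD_counter,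
      hcount, List.countP_map]
    norm_cast
    exact htp' i
  have hpred : ∀ i : Int, (pvTally predictions).getD i 0
      = ((labels.zip predictions).countP (fun q => q.2 == i) : Int) := by
    intro i
    unfold pvTally
    rw [PySem.Dict.foldl_insert_getD_add_one_eq_counter, PySem.Dict.getD_counter, hcount]
    have : List.countP (fun a => a == i) predictions
        = List.countP (fun q => q.2 == i) (labels.zip predictions) := by
      conv_lhs => rw [← hmap2]
      rw [List.countP_map]
      rfl
    rw [this]
  have hlab : ∀ i : Int, (pvTally (labels.take predictions.length)).getD i 0
      = ((labels.zip predictions).countP (fun q => q.1 == i) : Int) := by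
    intro i
    unfold pvTally
    rw [PySem.Dict.foldl_insert_getD_add_one_eq_counter, PySem.Dict.getD_counter, hcount]
    have : List.countP (fun a => a == i) (labels.take predictions.length)
        = List.countP (fun q => q.1 == i) (labels.zip predictions) := by
      conv_lhs => rw [← hmap1]
      rw [List.countP_map]
      rfl
    rw [this]
  -- count splits
  have hsplit_pred : ∀ i : Int, (labels.zip predictions).countP (fun q => q.2 == i)
      = (labels.zip predictions).countP (pvTP i) + (labels.zip predictions).countP (pvFP i) := by
    intro i
    rw [pvCountP_split (labels.zip predictions) (fun q => q.2 == i) (fun q => q.1 == i)]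
    rfl
  have hsplit_lab : ∀ i : Int, (labels.zip predictions).countP (fun q => q.1 == i)
      = (labels.zip predictions).countP (pvTP i) + (labels.zip predictions).countP (pvFN i) := by
    intro i
    rw [pvCountP_split (labels.zip predictions) (fun q => q.1 == i) (fun q => q.2 == i)]
    congr 1
    · apply List.countP_congr; intro q _
      by_cases h1 : q.1 = i <;> by_cases h2 : q.2 = i <;> simp [pvTP, h1, h2]
    · apply List.countP_congr; intro q _
      by_cases h1 : q.1 = i <;> by_cases h2 : q.2 = i <;> simp [pvFN, h1, h2]
  have hsplit_len : ∀ i : Int, (labels.zip predictions).length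
      = (labels.zip predictions).countP (fun q => q.2 == i)
        + ((labels.zip predictions).countP (pvFN i) + (labels.zip predictions).countP (pvTN i)) := by
    intro i
    have h0 : (labels.zip predictions).countP (fun _ => true) = (labels.zip predictions).length :=
      List.countP_eq_length.mpr (fun a _ => rfl)
    have h1 := pvCountP_split (labels.zip predictions) (fun _ => true) (fun q => q.2 == i)
    have h2 : (labels.zip predictions).countP (fun a => true && (a.2 == i))
        = (labels.zip predictions).countP (fun q => q.2 == i) :=
      List.countP_congr (fun q _ => by simp)
    have h3 : (labels.zip predictions).countP (fun a => true && !(a.2 == i))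
        = (labels.zip predictions).countP (pvFN i) + (labels.zip predictions).countP (pvTN i) := by
      have h4 := pvCountP_split (labels.zip predictions) (fun a => true && !(a.2 == i))
        (fun q => q.1 == i)
      have h5 : (labels.zip predictions).countP (fun a => (true && !(a.2 == i)) && (a.1 == i))
          = (labels.zip predictions).countP (pvFN i) :=
        List.countP_congr (fun q _ => by simp [pvFN])
      have h6 : (labels.zip predictions).countP (fun a => (true && !(a.2 == i)) && !(a.1 == i))
          = (labels.zip predictions).countP (pvTN i) :=
        List.countP_congr (fun q _ => by simp [pvTN])
      omega
    omega
  show pvOut _ = pvCanon labels predictions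
  unfold pvCanon
  apply congrArg pvOut
  rw [hpair]
  apply PySem.List.foldl_congr_mem
  intro acc i _
  simp only [hzip, hboth, hpred, hlab]
  have e1 : ((labels.zip predictions).countP (fun q => q.2 == i) : Int)
      - ((labels.zip predictions).countP (pvTP i) : Int)
      = ((labels.zip predictions).countP (pvFP i) : Int) := by
    have := hsplit_pred i; omega
  have e2 : ((labels.zip predictions).countP (fun q => q.1 == i) : Int)
      - ((labels.zip predictions).countP (pvTP i) : Int)
      = ((labels.zip predictions).countP (pvFN i) : Int) := by
    have := hsplit_lab i; omega
  have e3 : ((predictions.length : Int))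
      - ((labels.zip predictions).countP (pvTP i) : Int)
      - ((labels.zip predictions).countP (pvFP i) : Int)
      - ((labels.zip predictions).countP (pvFN i) : Int)
      = ((labels.zip predictions).countP (pvTN i) : Int) := by
    have h1 := hsplit_len i
    have h2 := hsplit_pred i
    omega
  rw [e1, e2, e3]
  by_cases c1 : List.countP (pvTP i) (labels.zip predictions) = 0 <;>
    by_cases c2 : List.countP (pvTN i) (labels.zip predictions) = 0 <;>
      by_cases c3 : List.countP (pvFP i) (labels.zip predictions) = 0 <;>
        by_cases c4 : List.countP (pvFN i) (labels.zip predictions) = 0 <;>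
          simp [pvStepC, c1, c2, c3, c4]

-- ===== VERDICT (by name: the statement is the Claim_ definition above) =====
theorem find_pos_and_neg_spec : Claim_equal_find_pos_and_neg := by
  intro labels predictions _ hpre
  unfold Spec_find_pos_and_neg
  rcases hpre with h | h
  · rw [pvA_eq labels predictions h, pvB_eq labels predictions h]
  · subst h
    simp [find_pos_and_neg, find_pos_and_neg_alt, PySem.Set.ofList, PySem.List.pyRange_zero]
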